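-- pv_equiv track=rewrite | github.com/Attyuttam/cp-practice | TLE eliminators/Div 800/jagged_swaps.py | solution
-- ===== SOURCE A (Python) =====
-- def solution(n, arr):
--     i = 1
--     sum = 0
--     minv = arr[0]
--     maxv = arr[0]
--     while i < n:
--         sum += arr[i] - arr[i-1]
--         minv = min(minv , arr[i])
--         maxv = max(maxv, arr[i])
--         i+=1
--     if sum > 0:
--         if arr[0] == minv and arr[n-1] == maxv:
--             return "YES"
--         elif minv < arr[0]:
--             return "NO"
--         elif maxv > arr[n-1] and maxv > arr[0]:
--             return "YES"
--
--     return "NO"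
-- ===== SOURCE B (Python) =====
-- def solution(n, arr):
--     # closed-form: diff-sum telescopes to arr[n-1]-arr[0]; YES iff that is positive
--     # and arr[0] is the minimum of the first n elements (the max conditions are implied)
--     first = arr[0]
--     if n <= 1:
--         return "NO"
--     last = arr[n - 1]
--     if last > first and min(arr[:n]) == first:
--         return "YES"
--     return "NO"
-- ===== Notes on version B (the rewrite author's own statement) =====
-- stated objective: simpler
-- what changed: Replaces A's while loop that tracks a running difference-sum, minimum and maximum by the telescoped closed form arr[n-1]-arr[0] plus a single library min over arr[:n]; the max tracking and A's four-way branch disappear because, once the last element exceeds the first, the answer is YES exactly when arr[0] is the minimum of the first n elements.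
import Mathlib
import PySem

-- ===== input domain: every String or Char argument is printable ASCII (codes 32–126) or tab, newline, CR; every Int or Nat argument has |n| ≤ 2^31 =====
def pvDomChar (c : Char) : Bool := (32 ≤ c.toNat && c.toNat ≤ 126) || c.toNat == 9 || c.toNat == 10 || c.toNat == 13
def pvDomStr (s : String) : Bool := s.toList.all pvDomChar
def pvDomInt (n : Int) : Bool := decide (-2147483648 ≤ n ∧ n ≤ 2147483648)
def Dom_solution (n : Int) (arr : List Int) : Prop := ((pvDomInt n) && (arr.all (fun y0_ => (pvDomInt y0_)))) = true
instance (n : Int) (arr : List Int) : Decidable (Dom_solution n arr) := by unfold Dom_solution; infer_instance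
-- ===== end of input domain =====

-- B replaces A's single while-loop (running diff-sum, min, max) by the telescoped closed form
-- arr[n-1]-arr[0] plus one library min over arr[:n]; objective: simpler (the max tracking disappears).


-- ===== PORT A =====
-- the while loop, state (i, sum, minv, maxv); element access is pyGetD (in range under Pre_)
def solutionLoop (n : Int) (arr : List Int) (i s mn mx : Int) : Int × Int × Int :=
  if _ : i < n then
    let v := PySem.List.pyGetD arr i 0
    solutionLoop n arr (i + 1) (s + (v - PySem.List.pyGetD arr (i - 1) 0)) (min mn v) (max mx v)
  else (s, mn, mx)
termination_by (n - i).toNat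
decreasing_by omega

def solution (n : Int) (arr : List Int) : String :=
  let a0 := PySem.List.pyGetD arr 0 0
  let r := solutionLoop n arr 1 0 a0 a0
  let s := r.1; let mn := r.2.1; let mx := r.2.2
  if s > 0 then
    if a0 = mn ∧ PySem.List.pyGetD arr (n - 1) 0 = mx then "YES"
    else if mn < a0 then "NO"
    else if mx > PySem.List.pyGetD arr (n - 1) 0 ∧ mx > a0 then "YES"
    else "NO"
  else "NO"

-- ===== PORT B =====
def solution_alt (n : Int) (arr : List Int) : String :=
  let first := PySem.List.pyGetD arr 0 0
  if n ≤ 1 then "NO"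
  else
    let last := PySem.List.pyGetD arr (n - 1) 0
    if last > first ∧ PySem.List.min? (PySem.List.slice arr none (some n)) (fun x => x) = some first
    then "YES" else "NO"

-- ===== PRECONDITION & SPEC =====
-- exactly the inputs on which A returns (otherwise arr[0] or arr[i], i < n, raises IndexError)
def Pre_solution (n : Int) (arr : List Int) : Prop := arr ≠ [] ∧ n ≤ (arr.length : Int)
instance (n : Int) (arr : List Int) : Decidable (Pre_solution n arr) := by unfold Pre_solution; infer_instance
def pvWitness_solution : Int × List Int := (3, [1, 2, 3])
def Spec_solution (n : Int) (arr : List Int) (out : String) : Prop := out = solution_alt n arr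
instance (n : Int) (arr : List Int) (out : String) : Decidable (Spec_solution n arr out) := by unfold Spec_solution; infer_instance

-- ===== CLAIM (what is proved, stated in full; the proofs are below) =====
def Claim_equal_solution : Prop := ∀ (n : Int) (arr : List Int), Dom_solution n arr → Pre_solution n arr → Spec_solution n arr (solution n arr)

-- ===== LEMMAS AND PROOFS =====

-- loop invariant: from index i (1 ≤ i, i + k = n ≤ len), the loop returns the telescoped sum and
-- the min/max folds over the remaining elements of the first-n prefix
lemma solutionLoop_spec (arr : List Int) (n : Int) (hn : n ≤ (arr.length : Int)) :
    ∀ (k : Nat) (i s mn mx : Int), 1 ≤ i → i + k = n →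
      solutionLoop n arr i s mn mx =
        (s + (arr.getD (n - 1).toNat 0 - arr.getD (i - 1).toNat 0),
         ((arr.take n.toNat).drop i.toNat).foldl min mn,
         ((arr.take n.toNat).drop i.toNat).foldl max mx) := by
  intro k
  induction k with
  | zero =>
    intro i s mn mx hi hik
    have hin : i = n := by omega
    rw [solutionLoop]
    have hdrop : ((arr.take n.toNat).drop i.toNat) = [] := by
      apply List.drop_eq_nil_of_le
      simp only [List.length_take]
      omega
    simp [hin]
  | succ k ih =>
    intro i s mn mx hi hik
    have hlt : i < n := by omega
    rw [solutionLoop]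
    simp only [hlt, dif_pos]
    have hilen : i.toNat < arr.length := by omega
    have hv : PySem.List.pyGetD arr i 0 = arr.getD i.toNat 0 := by
      rw [PySem.List.pyGetD_eq_getElem arr 0 (by omega) (by exact_mod_cast by omega),
        List.getD_eq_getElem arr 0 hilen]
    have hv1 : PySem.List.pyGetD arr (i - 1) 0 = arr.getD (i - 1).toNat 0 := by
      rw [PySem.List.pyGetD_eq_getElem arr 0 (by omega) (by exact_mod_cast by omega),
        List.getD_eq_getElem arr 0 (by omega)]
    have hitn : i.toNat < (arr.take n.toNat).length := by simp only [List.length_take]; omega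
    have hdrop : (arr.take n.toNat).drop i.toNat
        = arr.getD i.toNat 0 :: (arr.take n.toNat).drop (i + 1).toNat := by
      have hsucc : i.toNat + 1 = ((i : Int) + 1).toNat := by omega
      rw [List.drop_eq_getElem_cons hitn, List.getElem_take,
        List.getD_eq_getElem arr 0 hilen, hsucc]
    rw [ih (i + 1) _ _ _ (by omega) (by omega), hdrop]
    have hi1 : ((i : Int) + 1 - 1).toNat = i.toNat := by omega
    rw [hv, hv1, hi1]
    refine Prod.ext ?_ (Prod.ext rfl rfl)
    ring

lemma foldl_min_le_init (t : List Int) (a : Int) : t.foldl min a ≤ a :=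
  (PySem.List.foldl_min_le t a).1

lemma le_foldl_max_of_mem (t : List Int) (a y : Int) (h : y ∈ a :: t) : y ≤ t.foldl max a := by
  rcases List.mem_cons.mp h with h | h
  · exact h ▸ (PySem.List.le_foldl_max t a).1
  · exact (PySem.List.le_foldl_max t a).2 y h

-- ===== VERDICT (by name: the statement is the Claim_ definition above) =====
theorem solution_spec : Claim_equal_solution := by
  intro n arr _ hpre
  obtain ⟨hne, hlen⟩ := hpre
  unfold Spec_solution
  simp only [solution, solution_alt]
  by_cases hn1 : n ≤ 1
  · -- loop body never runs: sum = 0, not > 0 → "NO"; B's guard → "NO"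
    rw [solutionLoop]
    simp [hn1, show ¬ (1:Int) < n by omega]
  · have hn2 : 2 ≤ n := by omega
    have h0len : 0 < arr.length := List.length_pos_iff.mpr hne
    have ha0 : PySem.List.pyGetD arr 0 0 = arr[0] := by
      rw [PySem.List.pyGetD_eq_getElem arr 0 (by omega) (by exact_mod_cast h0len)]
      simp
    have hn1len : (n - 1).toNat < arr.length := by omega
    have hlastD : arr.getD (n - 1).toNat 0 = arr[(n - 1).toNat] := List.getD_eq_getElem arr 0 hn1len
    have hlast : PySem.List.pyGetD arr (n - 1) 0 = arr[(n - 1).toNat] :=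
      PySem.List.pyGetD_eq_getElem arr 0 (by omega) (by omega)
    have hrun := solutionLoop_spec arr n hlen (n - 1).toNat 1 0 arr[0] arr[0] (by omega) (by omega)
    have hslice : PySem.List.slice arr none (some n) = arr.take n.toNat :=
      PySem.List.slice_to arr (by omega)
    have htake : arr.take n.toNat = arr[0] :: (arr.take n.toNat).drop 1 := by
      conv_lhs => rw [← List.take_append_drop 1 (arr.take n.toNat)]
      rw [List.take_one]
      have h0 : (arr.take n.toNat)[0]'(by simp; omega) = arr[0] := List.getElem_take
      rw [List.head?_eq_getElem? , List.getElem?_eq_getElem (by simp; omega), h0]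
      rfl
    set t : List Int := (arr.take n.toNat).drop 1 with ht
    have hmin : PySem.List.min? (PySem.List.slice arr none (some n)) (fun x => x)
        = some (t.foldl min arr[0]) := by
      rw [hslice, htake]
      exact PySem.List.min?_id_cons _ _
    have hlast_mem : arr[(n - 1).toNat] ∈ arr[0] :: t := by
      rw [← htake]
      have hx : (arr.take n.toNat)[(n - 1).toNat]'(by simp; omega) = arr[(n - 1).toNat] :=
        List.getElem_take
      exact hx ▸ List.getElem_mem _
    have h1t : ((1 : Int)).toNat = 1 := rfl
    have h0t : ((1 : Int) - 1).toNat = 0 := rfl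
    have hgd0 : arr.getD 0 0 = arr[0] := List.getD_eq_getElem arr 0 h0len
    rw [ha0, hrun, hmin, hlast]
    simp only [h1t, h0t, hgd0, hlastD, ← ht]
    set a0 := arr[0] with ha0'
    set la := arr[(n - 1).toNat] with hla'
    have hmn_le : t.foldl min a0 ≤ a0 := foldl_min_le_init t a0
    have hla_le : la ≤ t.foldl max a0 := le_foldl_max_of_mem t a0 la hlast_mem
    set mn := t.foldl min a0
    set mx := t.foldl max a0
    by_cases hs : (0 : Int) + (la - a0) > 0
    · have hlt : a0 < la := by omega
      by_cases hm : a0 = mn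
      · by_cases hx : la = mx
        · simp [hm, hx, hn1]
        · have hxlt : mx > la := lt_of_le_of_ne hla_le hx
          simp [hm.symm, hx, hn1, hlt, hxlt, show mx > a0 by omega]
      · have hmlt : mn < a0 := lt_of_le_of_ne hmn_le (fun h => hm h.symm)
        simp [hm, hmlt, hn1]
        exact fun _ h => hm h.symm
    · simp [hn1, show ¬ a0 < la by omega]
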